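-- pv_equiv track=rewrite | github.com/palmbenjamin-gif/bookbot | stats.py | top_n_least_common_words
-- ===== SOURCE A (Python) =====
-- def top_n_least_common_words(text, n):
--     words = text.lower().split()
--     word_count = {}
--     for word in words:
--         if word in word_count:
--             word_count[word] += 1
--         else:
--             word_count[word] = 1
--     sorted_words = sorted(word_count.items(), key=lambda item: item[1])
--     return sorted_words[:n]
-- ===== SOURCE B (Python) =====
-- def top_n_least_common_words(text, n):
--     words = text.lower().split()
--     word_count = {}
--     for word in words:
--         word_count[word] = word_count.get(word, 0) + 1
--     max_count = 0
--     for c in word_count.values():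
--         max_count = max(max_count, c)
--     buckets = {}
--     for w, c in word_count.items():
--         buckets.setdefault(c, []).append((w, c))
--     ordered = []
--     for c in range(1, max_count + 1):
--         ordered.extend(buckets.get(c, []))
--     return ordered[:n]
-- ===== Notes on version B (the rewrite author's own statement) =====
-- stated objective: alternative
-- what changed: Replaces the comparison sort over (word,count) items by a counting/bucket sort: items are grouped into buckets keyed by their count and concatenated for counts 1..max_count, reproducing the stable sort-by-count order.
import Mathlib
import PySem

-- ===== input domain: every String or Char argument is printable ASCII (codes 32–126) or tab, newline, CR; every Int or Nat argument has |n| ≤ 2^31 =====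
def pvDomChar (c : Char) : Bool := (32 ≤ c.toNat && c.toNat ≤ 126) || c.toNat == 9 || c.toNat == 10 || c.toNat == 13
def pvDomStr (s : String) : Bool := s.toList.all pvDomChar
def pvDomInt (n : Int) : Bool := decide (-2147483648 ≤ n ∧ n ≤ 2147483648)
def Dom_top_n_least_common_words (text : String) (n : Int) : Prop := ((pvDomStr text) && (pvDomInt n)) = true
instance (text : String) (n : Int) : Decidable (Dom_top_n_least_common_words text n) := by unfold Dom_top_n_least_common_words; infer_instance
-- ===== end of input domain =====

-- B replaces the comparison sort of (word,count) items by a counting/bucket sort over counts 1..max_count (alternative algorithm, same results).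


-- ===== PORT A =====
def top_n_least_common_words (text : String) (n : Int) : List (String × Int) :=
  let words := PySem.Str.split₀ (PySem.Str.lower text)
  let word_count := words.foldl
    (fun d w => if d.contains w then d.insert w (d.getD w 0 + 1) else d.insert w 1)
    PySem.Dict.empty
  let sorted_words := PySem.List.sorted word_count.items (fun item => item.2)
  PySem.List.slice sorted_words none (some n)

-- ===== PORT B =====
def top_n_least_common_words_alt (text : String) (n : Int) : List (String × Int) :=
  let words := PySem.Str.split₀ (PySem.Str.lower text)
  let word_count := words.foldl (fun d w => d.insert w (d.getD w 0 + 1)) PySem.Dict.empty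
  let max_count := word_count.values.foldl (fun m c => max m c) 0
  let buckets := word_count.items.foldl
    (fun b p => b.modify p.2 [] (· ++ [p])) (PySem.Dict.empty : PySem.Dict Int (List (String × Int)))
  let ordered := (PySem.List.pyRange 1 (max_count + 1) 1).foldl (fun acc c => acc ++ buckets.getD c []) []
  PySem.List.slice ordered none (some n)

-- ===== PRECONDITION & SPEC =====
def Spec_top_n_least_common_words (text : String) (n : Int) (out : List (String × Int)) : Prop := out = top_n_least_common_words_alt text n
instance (text : String) (n : Int) (out : List (String × Int)) : Decidable (Spec_top_n_least_common_words text n out) := by unfold Spec_top_n_least_common_words; infer_instance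

-- ===== CLAIM (what is proved, stated in full; the proofs are below) =====
def Claim_equal_top_n_least_common_words : Prop := ∀ (text : String) (n : Int), Dom_top_n_least_common_words text n → Spec_top_n_least_common_words text n (top_n_least_common_words text n)

-- ===== LEMMAS AND PROOFS =====

-- A's if/else counting loop equals B's unconditional `d[w] = d.get(w,0)+1` loop.
lemma foldl_count_eq (words : List String) (d : PySem.Dict String Int) :
    words.foldl (fun d w => if d.contains w then d.insert w (d.getD w 0 + 1) else d.insert w 1) d
      = words.foldl (fun d w => d.insert w (d.getD w 0 + 1)) d := by
  induction words generalizing d with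
  | nil => rfl
  | cons w ws ih =>
      simp only [List.foldl_cons]
      by_cases h : d.contains w = true
      · rw [if_pos h, ih]
      · rw [if_neg h, PySem.Dict.getD_of_not_contains _ _ (by simpa using h)]
        simpa using ih _

-- foldl max bounds
lemma le_foldl_max (l : List Int) (m : Int) : m ≤ l.foldl (fun m c => max m c) m := by
  induction l generalizing m with
  | nil => simp
  | cons c cs ih => exact le_trans (le_max_left m c) (ih _)

lemma mem_le_foldl_max (l : List Int) (m : Int) : ∀ c ∈ l, c ≤ l.foldl (fun m c => max m c) m := by
  induction l generalizing m with
  | nil => simp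
  | cons x xs ih =>
      intro c hc
      rcases List.mem_cons.1 hc with rfl | hc
      · exact le_trans (le_max_right m c) (le_foldl_max _ _)
      · exact ih _ c hc

-- insertBy skips a prefix it is not before
lemma insertBy_append_left {α : Type} (bef : α → α → Bool) (x : α) (l1 l2 : List α)
    (h1 : ∀ y ∈ l1, bef x y = false) :
    PySem.List.insertBy bef x (l1 ++ l2) = l1 ++ PySem.List.insertBy bef x l2 := by
  induction l1 with
  | nil => simp
  | cons y ys ih =>
      have hy : bef x y = false := h1 y (by simp)
      simp only [List.cons_append, PySem.List.insertBy, hy, Bool.false_eq_true, if_false]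
      rw [ih (fun z hz => h1 z (by simp [hz]))]

lemma insertBy_between {α : Type} (bef : α → α → Bool) (x : α) (l1 l2 : List α)
    (h1 : ∀ y ∈ l1, bef x y = false) (h2 : ∀ y ∈ l2, bef x y = true) :
    PySem.List.insertBy bef x (l1 ++ l2) = l1 ++ x :: l2 := by
  rw [insertBy_append_left bef x l1 l2 h1]
  cases l2 with
  | nil => simp [PySem.List.insertBy]
  | cons z zs => simp [PySem.List.insertBy, h2 z (by simp)]

lemma flatMap_congr {α β : Type} (l : List α) (f g : α → List β)
    (h : ∀ a ∈ l, f a = g a) : l.flatMap f = l.flatMap g := by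
  simp only [List.flatMap_def]
  rw [List.map_congr_left h]

lemma insertBy_flatMap {α : Type} (key : α → Int) (x : α) (cs : List Int) (g : Int → List α)
    (hcs : cs.Pairwise (· < ·)) (hx : key x ∈ cs) (hg : ∀ c ∈ cs, ∀ y ∈ g c, key y = c) :
    PySem.List.insertBy (fun a b => decide (key a < key b)) x (cs.flatMap g)
      = cs.flatMap (fun c => g c ++ if key x == c then [x] else []) := by
  induction cs with
  | nil => simp at hx
  | cons c cs' ih =>
      have hpair := (List.pairwise_cons.1 hcs).1
      have hcs' := (List.pairwise_cons.1 hcs).2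
      simp only [List.flatMap_cons]
      by_cases hkc : key x = c
      · have h1 : ∀ y ∈ g c, (fun a b => decide (key a < key b)) x y = false := by
          intro y hy
          have := hg c (by simp) y hy
          simp [this, hkc]
        have h2 : ∀ y ∈ cs'.flatMap g, (fun a b => decide (key a < key b)) x y = true := by
          intro y hy
          rcases List.mem_flatMap.1 hy with ⟨c', hc', hyc'⟩
          have := hg c' (by simp [hc']) y hyc'
          simp [this, hkc]
          exact hpair c' hc'
        rw [insertBy_between _ _ _ _ h1 h2]
        have : cs'.flatMap (fun c' => g c' ++ if key x == c' then [x] else []) = cs'.flatMap g := by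
          apply flatMap_congr
          intro c' hc'
          have : key x ≠ c' := by
            have := hpair c' hc'
            omega
          simp [this]
        rw [this]
        simp [hkc]
      · have hx' : key x ∈ cs' := by
          rcases List.mem_cons.1 hx with h | h
          · exact absurd h hkc
          · exact h
        have h1 : ∀ y ∈ g c, (fun a b => decide (key a < key b)) x y = false := by
          intro y hy
          have hyc := hg c (by simp) y hy
          have : c < key x := hpair _ hx'
          simp [hyc]
          omega
        rw [insertBy_append_left _ _ _ _ h1]
        rw [ih hcs' hx' (fun c' hc' => hg c' (by simp [hc']))]
        have : (key x == c) = false := by simp [hkc]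
        simp [this]

-- stable sort by an Int key is bucket concatenation over any strictly increasing cover of the keys
lemma sorted_eq_flatMap_buckets {α : Type} (key : α → Int) (xs : List α) (cs : List Int)
    (hcs : cs.Pairwise (· < ·)) (hmem : ∀ x ∈ xs, key x ∈ cs) :
    PySem.List.sorted xs key = cs.flatMap (fun c => xs.filter (fun x => key x == c)) := by
  induction xs using List.reverseRecOn with
  | nil =>
      simp only [PySem.List.sorted]
      symm
      exact List.flatMap_eq_nil_iff.2 (fun c hc => List.filter_nil)
  | append_singleton ys x ih =>
      have hsort : PySem.List.sorted (ys ++ [x]) key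
          = PySem.List.insertBy (fun a b => decide (key a < key b)) x (PySem.List.sorted ys key) := by
        rw [PySem.List.sorted_eq_foldl_insertBy, PySem.List.sorted_eq_foldl_insertBy]
        simp
      rw [hsort, ih (fun y hy => hmem y (by simp [hy]))]
      rw [insertBy_flatMap key x cs _ hcs (hmem x (by simp))
        (by intro c hc y hy; simpa using (List.mem_filter.1 hy).2)]
      apply flatMap_congr
      intro c hc
      rw [List.filter_append]
      by_cases h : key x = c <;> simp [h]

-- ===== VERDICT (by name: the statement is the Claim_ definition above) =====
theorem top_n_least_common_words_spec : Claim_equal_top_n_least_common_words := by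
  intro text n _
  unfold Spec_top_n_least_common_words
  simp only [top_n_least_common_words, top_n_least_common_words_alt]
  rw [foldl_count_eq, PySem.Dict.foldl_insert_getD_add_one_eq_counter]
  set words := PySem.Str.split₀ (PySem.Str.lower text) with hwords
  set items := (PySem.Dict.counter words).items with hitems
  set M := ((PySem.Dict.counter words).values).foldl (fun m c => max m c) 0 with hM
  -- every item's count lies in [1, M]
  have hval : (PySem.Dict.counter words).values = items.map (fun p => p.2) := rfl
  have hbound : ∀ p ∈ items, 1 ≤ p.2 ∧ p.2 ≤ M := by
    intro p hp
    constructor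
    · rw [hitems, PySem.Dict.items_counter] at hp
      rcases List.mem_map.1 hp with ⟨k, hk, rfl⟩
      have : k ∈ words := (PySem.Set.mem_ofList words k).1 hk
      have := List.count_pos_iff.2 this
      simp only []
      exact_mod_cast this
    · have : p.2 ∈ (PySem.Dict.counter words).values := by
        rw [hval]; exact List.mem_map_of_mem hp
      exact mem_le_foldl_max _ 0 p.2 this
  -- the bucket dict looks up to a filter of items
  have hbucket : ∀ c : Int,
      (items.foldl (fun b p => b.modify p.2 [] (· ++ [p]))
        (PySem.Dict.empty : PySem.Dict Int (List (String × Int)))).getD c []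
        = items.filter (fun p => p.2 == c) := by
    intro c
    have hmap : items.foldl (fun b p => b.modify p.2 [] (· ++ [p]))
        (PySem.Dict.empty : PySem.Dict Int (List (String × Int)))
        = (items.map (fun p => (p.2, p))).foldl (fun d q => d.modify q.1 [] (· ++ [q.2]))
            PySem.Dict.empty := by
      rw [List.foldl_map]
    rw [hmap, PySem.Dict.getD_foldl_modify_append]
    simp [List.filter_map, Function.comp_def]
  -- the concatenation loop is a flatMap of the buckets
  rw [PySem.List.foldl_append_eq_flatMap]
  have hflat : (PySem.List.pyRange 1 (M + 1) 1).flatMap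
      (fun c => (items.foldl (fun b p => b.modify p.2 [] (· ++ [p]))
        (PySem.Dict.empty : PySem.Dict Int (List (String × Int)))).getD c [])
      = (PySem.List.pyRange 1 (M + 1) 1).flatMap (fun c => items.filter (fun p => p.2 == c)) := by
    apply flatMap_congr
    intro c _
    exact hbucket c
  rw [hflat, List.nil_append]
  -- bucket concatenation IS the stable sort by count
  rw [sorted_eq_flatMap_buckets (fun p => p.2) items (PySem.List.pyRange 1 (M + 1) 1)
    (PySem.List.pairwise_lt_pyRange_one 1 (M + 1))
    (by
      intro p hp
      rcases hbound p hp with ⟨h1, h2⟩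
      refine PySem.List.mem_pyRange_one.2 ⟨h1, ?_⟩
      show p.2 < M + 1
      omega)]
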